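-- pv_equiv track=rewrite | github.com/G0LDF0X/Python-Coding-Test-Study | myeonghoon/2024_08_02/한 줄로 서기.py | solution
-- ===== SOURCE A (Python) =====
-- def solution(N, switch_num):
--     answer = []
--     temp = 0
--
--     for i in range(1, N+1):
--         answer.append(i)
--
--     for i in range(N-1, -1, -1):
--         # answer[i] # answer[3] = 4
--         for j in range(switch_num[i]): # switch_num[3] = 0, switch_num[2]=1 switch가 2면 0, 1 i+0, i+1, i+2
--             index = i+j
--             temp = answer[index] # 3
--             answer[index] = answer[index+1] # 1, 2, 4, 4
--             answer[index+1] = temp # 1, 2, 4, 3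
--
--     return answer
-- ===== SOURCE B (Python) =====
-- def solution(N, switch_num):
--     # Build the line directly: insert each value i (taken from largest to smallest)
--     # at the index given by its swap count; a non-positive count means no swaps,
--     # i.e. the value stays at the front of the already-placed suffix.
--     answer = []
--     for i in range(N, 0, -1):
--         answer.insert(max(switch_num[i - 1], 0), i)
--     return answer
-- ===== Notes on version B (the rewrite author's own statement) =====
-- stated objective: simpler
-- what changed: Instead of simulating the rightward bubble swaps in a preallocated [1..N] array with nested index loops, B builds the line in one pass by inserting each value (from N down to 1) directly at the index given by its swap count.
import Mathlib
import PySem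

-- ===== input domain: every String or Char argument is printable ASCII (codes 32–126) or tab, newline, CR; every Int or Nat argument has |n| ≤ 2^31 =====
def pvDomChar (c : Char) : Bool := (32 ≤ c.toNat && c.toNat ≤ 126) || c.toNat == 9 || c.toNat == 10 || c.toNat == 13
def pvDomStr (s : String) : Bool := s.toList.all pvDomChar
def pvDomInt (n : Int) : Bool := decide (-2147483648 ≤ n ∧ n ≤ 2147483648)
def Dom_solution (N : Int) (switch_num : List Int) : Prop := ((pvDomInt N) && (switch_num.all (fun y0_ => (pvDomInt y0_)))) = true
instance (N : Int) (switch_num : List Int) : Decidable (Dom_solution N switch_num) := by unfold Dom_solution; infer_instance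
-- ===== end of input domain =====

-- B builds the line by one pass of inserts instead of A's nested bubble-swap simulation; same result, proved equal on Pre_.

-- ===== PORT A =====
-- the body of the inner 'for j in range(switch_num[i])' loop: the three-line swap of answer[i+j], answer[i+j+1]
-- (indices are in range under Pre_, so the total pyGetD/pySetD forms are exact here)
def swapA (i : Int) (answer : List Int) (j : Int) : List Int :=
  let index := i + j
  let temp := PySem.List.pyGetD answer index 0
  let answer := PySem.List.pySetD answer index (PySem.List.pyGetD answer (index + 1) 0)
  PySem.List.pySetD answer (index + 1) temp

-- the inner loop for one value of i (switch_num[i] is in range under Pre_)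
def innerA (switch_num : List Int) (answer : List Int) (i : Int) : List Int :=
  (PySem.List.pyRange 0 (PySem.List.pyGetD switch_num i 0) 1).foldl (swapA i) answer

def solution (N : Int) (switch_num : List Int) : List Int :=
  let answer := (PySem.List.pyRange 1 (N + 1) 1).foldl (fun a i => a ++ [i]) []
  (PySem.List.pyRange (N - 1) (-1) (-1)).foldl (innerA switch_num) answer

-- ===== PORT B =====
-- one step of B's loop: insert value i at index max(switch_num[i-1], 0)
def stepB (switch_num : List Int) (answer : List Int) (i : Int) : List Int :=
  PySem.List.insert answer (max (PySem.List.pyGetD switch_num (i - 1) 0) 0) i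

def solution_alt (N : Int) (switch_num : List Int) : List Int :=
  (PySem.List.pyRange N 0 (-1)).foldl (stepB switch_num) []

-- ===== PRECONDITION & SPEC =====
-- exactly the inputs on which A returns: switch_num long enough, and each swap count small
-- enough that the bubble loop never indexes past the end of the array
def Pre_solution (N : Int) (switch_num : List Int) : Prop :=
  N ≤ (switch_num.length : Int) ∧ ∀ t : Nat, t < N.toNat → switch_num.getD t 0 ≤ N - 1 - (t : Int)
instance (N : Int) (switch_num : List Int) : Decidable (Pre_solution N switch_num) := by unfold Pre_solution; infer_instance

def pvWitness_solution : Int × List Int := (4, [2, 1, 1, 0])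

def Spec_solution (N : Int) (switch_num : List Int) (out : List Int) : Prop := out = solution_alt N switch_num
instance (N : Int) (switch_num : List Int) (out : List Int) : Decidable (Spec_solution N switch_num out) := by unfold Spec_solution; infer_instance

-- ===== CLAIM (what is proved, stated in full; the proofs are below) =====
def Claim_equal_solution : Prop := ∀ (N : Int) (switch_num : List Int), Dom_solution N switch_num → Pre_solution N switch_num → Spec_solution N switch_num (solution N switch_num)

-- ===== LEMMAS AND PROOFS =====

-- the three-line swap body applied at index i+j = |P| swaps the two heads of the suffix
lemma swap_mid_nat (P S : List Int) (a b : Int) :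
    ((P ++ a :: b :: S).set P.length ((P ++ a :: b :: S).getD (P.length + 1) 0)).set
      (P.length + 1) ((P ++ a :: b :: S).getD P.length 0) = P ++ b :: a :: S := by
  induction P with
  | nil => simp
  | cons p P ih => simpa using ih

lemma swapA_mid (i j : Int) (P S : List Int) (a b : Int)
    (hij : i + j = (P.length : Int)) :
    swapA i (P ++ a :: b :: S) j = P ++ b :: a :: S := by
  simp only [swapA, hij]
  have h1 : (P.length : Int) + 1 = ((P.length + 1 : Nat) : Int) := by push_cast; ring
  rw [h1]
  simp only [PySem.List.pyGetD_natCast, PySem.List.pySetD_natCast]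
  simpa using swap_mid_nat P S a b

lemma getD_mid (P S : List Int) (a d : Int) : (P ++ a :: S).getD P.length d = a := by
  induction P with
  | nil => rfl
  | cons p P ih => simpa using ih

-- the inner loop bubbles the element at position i rightward k places
lemma bubble_eq (i : Nat) : ∀ (k : Nat) (ans : List Int), i + k < ans.length →
    (PySem.List.pyRange 0 (k : Int) 1).foldl (swapA (i : Int)) ans
      = ans.take i ++ (ans.drop (i + 1)).take k ++ ans.getD i 0 :: ans.drop (i + 1 + k) := by
  intro k
  induction k with
  | zero =>
    intro ans h
    rw [PySem.List.pyRange_one_eq_nil (by omega)]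
    simp only [List.foldl_nil, List.take_zero, List.nil_append]
    have h0 : i < ans.length := by omega
    conv_lhs => rw [← List.take_append_drop i ans]
    rw [List.drop_eq_getElem_cons h0, List.getD_eq_getElem ans 0 h0]
    simp
  | succ k ih =>
    intro ans h
    have hk : ((k + 1 : Nat) : Int) = (k : Int) + 1 := by push_cast; ring
    rw [hk, PySem.List.pyRange_one_succ_right (by omega), List.foldl_append]
    rw [ih ans (by omega)]
    simp only [List.foldl_cons, List.foldl_nil]
    have hik : i + 1 + k < ans.length := by omega
    have hdrop : ans.drop (i + 1 + k) = ans[i + 1 + k] :: ans.drop (i + 1 + k + 1) :=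
      List.drop_eq_getElem_cons hik
    rw [hdrop]
    have hlenP : (ans.take i ++ (ans.drop (i + 1)).take k).length = i + k := by
      simp [List.length_take, List.length_drop]
      omega
    rw [swapA_mid (i : Int) (k : Int) _ _ _ _ (by rw [hlenP]; push_cast; ring)]
    have htake : (ans.drop (i + 1)).take (k + 1)
        = (ans.drop (i + 1)).take k ++ [ans[i + 1 + k]] := by
      rw [List.take_succ]
      have : (ans.drop (i + 1))[k]? = some ans[i + 1 + k] := by
        rw [List.getElem?_drop]
        exact List.getElem?_eq_getElem (by omega)
      simp [this]
    rw [htake]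
    simp only [List.append_assoc, List.cons_append, List.nil_append]
    have : i + 1 + (k + 1) = i + 1 + k + 1 := by omega
    rw [this]

lemma drop_mid (P S : List Int) : (P ++ S).drop P.length = S :=
  List.drop_left

-- main invariant: with values t+1..N already placed (suffix R), A's remaining outer
-- iterations equal B's remaining inserts of the values t..1
lemma outer_eq (sw : List Int) (n : Nat)
    (hpre : ∀ t : Nat, t < n → sw.getD t 0 ≤ (n : Int) - 1 - (t : Int)) :
    ∀ (t : Nat), t ≤ n → ∀ R : List Int, R.length = n - t →
      (PySem.List.pyRange ((t : Int) - 1) (-1) (-1)).foldl (innerA sw)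
          (PySem.List.pyRange 1 ((t : Int) + 1) 1 ++ R)
        = (PySem.List.pyRange (t : Int) 0 (-1)).foldl (stepB sw) R := by
  intro t
  induction t with
  | zero =>
    intro _ R _
    rw [PySem.List.pyRange_neg_one_eq_nil (by omega), PySem.List.pyRange_neg_one_eq_nil (by omega),
      PySem.List.pyRange_one_eq_nil (by omega)]
    simp
  | succ t ih =>
    intro ht R hR
    have hc : ((t + 1 : Nat) : Int) = (t : Int) + 1 := by push_cast; ring
    rw [hc]
    have h1 : (t : Int) + 1 - 1 = (t : Int) := by ring
    rw [h1, PySem.List.pyRange_neg_one_cons (by omega), List.foldl_cons]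
    rw [PySem.List.pyRange_one_succ_right (by omega), List.append_assoc]
    rw [PySem.List.pyRange_neg_one_cons (show (0 : Int) < (t : Int) + 1 by omega), List.foldl_cons]
    set P := PySem.List.pyRange 1 ((t : Int) + 1) 1 with hP
    have hPlen : P.length = t := by rw [hP, PySem.List.length_pyRange_one]; omega
    have hinner : innerA sw (P ++ ((t : Int) + 1) :: R) (t : Int)
        = P ++ (R.take (sw.getD t 0).toNat ++ ((t : Int) + 1) :: R.drop (sw.getD t 0).toNat) := by
      unfold innerA
      rw [PySem.List.pyGetD_natCast]
      by_cases hk : sw.getD t 0 ≤ 0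
      · rw [PySem.List.pyRange_one_eq_nil hk]
        have h0 : (sw.getD t 0).toNat = 0 := by omega
        rw [h0]
        simp
      · push_neg at hk
        have hkb : sw.getD t 0 ≤ (n : Int) - 1 - (t : Int) := hpre t (by omega)
        have hklen : (sw.getD t 0).toNat ≤ R.length := by omega
        have hkn : sw.getD t 0 = ((sw.getD t 0).toNat : Int) := by omega
        conv_lhs => rw [hkn]
        rw [bubble_eq t (sw.getD t 0).toNat _
          (by rw [List.length_append, List.length_cons, hPlen]; omega)]
        have htk : (P ++ ((t : Int) + 1) :: R).take t = P := by
          rw [← hPlen]; exact List.take_left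
        have hgd := getD_mid P R ((t : Int) + 1) 0
        rw [hPlen] at hgd
        have hd1 : (P ++ ((t : Int) + 1) :: R).drop (t + 1) = R := by
          have h := drop_mid (P ++ [(t : Int) + 1]) R
          simp only [List.length_append, List.length_cons, List.length_nil, hPlen,
            List.append_assoc, List.cons_append, List.nil_append] at h
          simpa using h
        have hd2 : (P ++ ((t : Int) + 1) :: R).drop (t + 1 + (sw.getD t 0).toNat)
            = R.drop (sw.getD t 0).toNat := by
          rw [← List.drop_drop, hd1]
        rw [htk, hgd, hd1, hd2, List.append_assoc]
    have hstep : stepB sw R ((t : Int) + 1)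
        = R.take (sw.getD t 0).toNat ++ ((t : Int) + 1) :: R.drop (sw.getD t 0).toNat := by
      unfold stepB
      rw [show (t : Int) + 1 - 1 = ((t : Nat) : Int) by push_cast; ring,
        PySem.List.pyGetD_natCast]
      by_cases hk : sw.getD t 0 ≤ 0
      · rw [show max (sw.getD t 0) 0 = 0 by omega, PySem.List.insert_zero,
          show (sw.getD t 0).toNat = 0 by omega]
        simp
      · push_neg at hk
        have hkb : sw.getD t 0 ≤ (n : Int) - 1 - (t : Int) := hpre t (by omega)
        have hklen : (sw.getD t 0).toNat ≤ R.length := by omega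
        rw [show max (sw.getD t 0) 0 = ((sw.getD t 0).toNat : Int) by omega,
          PySem.List.insert_natCast R _ _ hklen]
    simp only [List.singleton_append, h1]
    rw [hinner, hstep]
    exact ih (by omega) _ (by simp [List.length_take, List.length_drop]; omega)

-- ===== VERDICT (by name: the statement is the Claim_ definition above) =====
theorem solution_spec : Claim_equal_solution := by
  unfold Claim_equal_solution
  intro N sw _ hpre
  unfold Spec_solution solution solution_alt
  rcases hpre with ⟨hlen, hpre⟩
  by_cases hN : N ≤ 0
  · rw [PySem.List.pyRange_one_eq_nil (by omega), PySem.List.pyRange_neg_one_eq_nil (by omega),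
      PySem.List.pyRange_neg_one_eq_nil (by omega)]
    simp
  · push_neg at hN
    rw [PySem.List.foldl_append_singleton, List.nil_append]
    have hn : N = (N.toNat : Int) := by omega
    rw [hn]
    have h := outer_eq sw N.toNat (by intro u hu; have := hpre u hu; omega)
      N.toNat le_rfl [] (by simp)
    simpa using h
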